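-- pv_equiv track=rewrite | github.com/Cross-bit/group-consensus-eval | evaluation_frameworks/consensus_evaluation/evaluation/evaluations/print/table_rfc_comparisions.py | strategy_2_slug
-- ===== SOURCE A (Python) =====
-- from typing import Any, Dict, List, Optional
--
-- def strategy_2_slug(algos: List[str]) -> Dict[str, str]:
--     res = {}
--     sync_ctr = 0
--     async_ctr = 0
--     hybrid_ctr = 0
--
--     for algo_name in algos:
--         if "async" in algo_name:
--             res[f"A{async_ctr}"] = algo_name
--             async_ctr += 1
--         elif "hybrid" in algo_name:
--             res[f"H{hybrid_ctr}"] = algo_name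
--             hybrid_ctr += 1
--         else:
--             res[f"S{sync_ctr}"] = algo_name
--             sync_ctr += 1
--
--     return res
-- ===== SOURCE B (Python) =====
-- from typing import Dict, List
--
--
-- def strategy_2_slug(algos: List[str]) -> Dict[str, str]:
--     def pref(name: str) -> str:
--         if "async" in name:
--             return "A"
--         if "hybrid" in name:
--             return "H"
--         return "S"
--
--     a_idx = [i for i, n in enumerate(algos) if pref(n) == "A"]
--     h_idx = [i for i, n in enumerate(algos) if pref(n) == "H"]
--     s_idx = [i for i, n in enumerate(algos) if pref(n) == "S"]
--     key_at = {}
--     for c, ids in (("A", a_idx), ("H", h_idx), ("S", s_idx)):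
--         for j, i in enumerate(ids):
--             key_at[i] = c + str(j)
--     return {key_at[i]: n for i, n in enumerate(algos)}
-- ===== Notes on version B (the rewrite author's own statement) =====
-- stated objective: alternative
-- what changed: Replaces the single stateful loop with three mutable counters by a partition: three comprehensions collect the indices of each category, per-category enumeration assigns each index its key, and a final comprehension assembles the dict in input order.
import Mathlib
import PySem

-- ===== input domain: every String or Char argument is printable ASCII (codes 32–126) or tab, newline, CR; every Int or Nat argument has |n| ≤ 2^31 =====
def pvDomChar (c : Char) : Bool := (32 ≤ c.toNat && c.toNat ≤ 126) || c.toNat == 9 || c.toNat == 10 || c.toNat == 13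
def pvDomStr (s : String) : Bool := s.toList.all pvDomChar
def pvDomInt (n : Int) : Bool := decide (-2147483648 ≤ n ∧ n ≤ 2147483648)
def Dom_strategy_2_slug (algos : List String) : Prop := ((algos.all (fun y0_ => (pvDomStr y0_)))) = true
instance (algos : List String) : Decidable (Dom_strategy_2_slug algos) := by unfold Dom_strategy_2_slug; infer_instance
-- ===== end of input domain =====

-- B replaces A's stateful three-counter loop by a partition into per-category index lists,
-- per-category enumeration to assign keys, and a final pass assembling the dict in input order.

-- ===== PORT A =====
def strategy_2_slug (algos : List String) : List (String × String) :=
  (algos.foldl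
    (fun (st : PySem.Dict String String × Int × Int × Int) algo_name =>
      match st with
      | (res, sync_ctr, async_ctr, hybrid_ctr) =>
        if PySem.Str.isIn "async" algo_name then
          (res.insert ("A" ++ PySem.Int.toStr async_ctr) algo_name, sync_ctr, async_ctr + 1, hybrid_ctr)
        else if PySem.Str.isIn "hybrid" algo_name then
          (res.insert ("H" ++ PySem.Int.toStr hybrid_ctr) algo_name, sync_ctr, async_ctr, hybrid_ctr + 1)
        else
          (res.insert ("S" ++ PySem.Int.toStr sync_ctr) algo_name, sync_ctr + 1, async_ctr, hybrid_ctr))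
    (PySem.Dict.empty, 0, 0, 0)).1.items

-- ===== PORT B =====
-- pref(name)
def pvPref (name : String) : String :=
  if PySem.Str.isIn "async" name then "A"
  else if PySem.Str.isIn "hybrid" name then "H"
  else "S"

-- [i for i, n in enumerate(algos) if pref(n) == c]  (the three comprehensions of Source B)
def pvIdxOf (algos : List String) (c : String) : List Int :=
  ((PySem.List.enumerate algos).filter (fun p => pvPref p.2 == c)).map (fun p => p.1)

-- key_at built by the nested loop over (("A", a_idx), ("H", h_idx), ("S", s_idx))
def pvKeyAt (algos : List String) : PySem.Dict Int String :=
  [("A", pvIdxOf algos "A"), ("H", pvIdxOf algos "H"), ("S", pvIdxOf algos "S")].foldl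
    (fun (d : PySem.Dict Int String) cids =>
      (PySem.List.enumerate cids.2).foldl
        (fun (d : PySem.Dict Int String) ji => d.insert ji.2 (cids.1 ++ PySem.Int.toStr ji.1)) d)
    PySem.Dict.empty

def strategy_2_slug_alt (algos : List String) : List (String × String) :=
  -- {key_at[i]: n for i, n in enumerate(algos)}; key_at[i] always exists (every index is in
  -- exactly one category list), so the .getD "" default is never used
  ((PySem.List.enumerate algos).foldl
    (fun (res : PySem.Dict String String) p =>
      res.insert (((pvKeyAt algos).get? p.1).getD "") p.2)
    PySem.Dict.empty).items

-- ===== PRECONDITION & SPEC =====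
def Spec_strategy_2_slug (algos : List String) (out : List (String × String)) : Prop := out = strategy_2_slug_alt algos
instance (algos : List String) (out : List (String × String)) : Decidable (Spec_strategy_2_slug algos out) := by unfold Spec_strategy_2_slug; infer_instance

-- ===== CLAIM (what is proved, stated in full; the proofs are below) =====
def Claim_equal_strategy_2_slug : Prop := ∀ (algos : List String), Dom_strategy_2_slug algos → Spec_strategy_2_slug algos (strategy_2_slug algos)

-- ===== LEMMAS AND PROOFS =====

-- count, in l, of the names whose category prefix is c (as an Int: the value A keeps in a counter)
def pvCnt (c : String) (l : List String) : Int :=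
  ((l.filter (fun m => pvPref m == c)).length : Int)

theorem pvCnt_append_singleton (c : String) (l : List String) (x : String) :
    pvCnt c (l ++ [x]) = pvCnt c l + if pvPref x == c then 1 else 0 := by
  simp only [pvCnt, List.filter_append, List.length_append, Nat.cast_add]
  congr 1
  by_cases h : pvPref x = c
  · simp [h]
  · have hf : (pvPref x == c) = false := beq_eq_false_iff_ne.mpr h
    simp [hf]

theorem pv_enumerate_append {α : Type} (l1 l2 : List α) (s : Int) :
    PySem.List.enumerate (l1 ++ l2) s
      = PySem.List.enumerate l1 s ++ PySem.List.enumerate l2 (s + l1.length) := by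
  induction l1 generalizing s with
  | nil => simp [PySem.List.enumerate_nil]
  | cons x t ih =>
      simp only [List.cons_append, PySem.List.enumerate_cons, ih, List.length_cons]
      rw [show s + 1 + (t.length : Int) = s + ((t.length : Int) + 1) by ring]
      push_cast
      ring_nf

theorem pv_enumerate_fst_bound {α : Type} (l : List α) (s : Int) :
    ∀ p ∈ PySem.List.enumerate l s, s ≤ p.1 ∧ p.1 < s + l.length := by
  induction l generalizing s with
  | nil => simp [PySem.List.enumerate_nil]
  | cons x t ih =>
      intro p hp
      rw [PySem.List.enumerate_cons, List.mem_cons] at hp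
      rcases hp with h | h
      · subst h; constructor
        · exact le_refl s
        · simp only [List.length_cons]; push_cast; omega
      · have := ih (s + 1) p h
        simp only [List.length_cons]
        push_cast
        omega

-- lookup after the inner key-assignment loop, key absent from the loop's list
theorem pv_get?_fold_not_mem (c : String) (el : List (Int × Int)) (d : PySem.Dict Int String)
    (m : Int) (h : ∀ ji ∈ el, ji.2 ≠ m) :
    ((el.foldl (fun (d : PySem.Dict Int String) ji => d.insert ji.2 (c ++ PySem.Int.toStr ji.1)) d).get? m)
      = d.get? m := by
  induction el generalizing d with
  | nil => rfl
  | cons x t ih =>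
      rw [List.foldl_cons, ih _ (fun ji hji => h ji (List.mem_cons_of_mem x hji))]
      exact PySem.Dict.get?_insert_of_ne _ _ (fun he => h x List.mem_cons_self he.symm)

-- lookup after the inner key-assignment loop, key present exactly once (later entries avoid it)
theorem pv_get?_fold_mem (c : String) (el1 el2 : List (Int × Int)) (d : PySem.Dict Int String)
    (j m : Int) (h2 : ∀ ji ∈ el2, ji.2 ≠ m) :
    (((el1 ++ (j, m) :: el2).foldl
        (fun (d : PySem.Dict Int String) ji => d.insert ji.2 (c ++ PySem.Int.toStr ji.1)) d).get? m)
      = some (c ++ PySem.Int.toStr j) := by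
  rw [List.foldl_append, List.foldl_cons, pv_get?_fold_not_mem c el2 _ m h2]
  exact PySem.Dict.get?_insert_self
    ((el1.foldl (fun (d : PySem.Dict Int String) ji => d.insert ji.2 (c ++ PySem.Int.toStr ji.1)) d)) m (c ++ PySem.Int.toStr j)

-- the index list of category c around position |pre|
theorem pv_idx_decomp (pre : List String) (x : String) (suff : List String) (c : String) :
    pvIdxOf (pre ++ x :: suff) c
      = pvIdxOf pre c
        ++ (if pvPref x == c then [((pre.length : Int), x)].map (fun p => p.1) else [])
        ++ ((PySem.List.enumerate suff ((pre.length : Int) + 1)).filter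
              (fun p => pvPref p.2 == c)).map (fun p => p.1) := by
  unfold pvIdxOf
  rw [show pre ++ x :: suff = (pre ++ [x]) ++ suff by simp,
      pv_enumerate_append, pv_enumerate_append]
  simp only [List.filter_append, List.map_append, List.length_append, List.length_singleton]
  congr 2
  · simp only [PySem.List.enumerate, List.filter, List.map]
    by_cases h : pvPref x = c
    · simp [h]
    · have hf : (pvPref x == c) = false := beq_eq_false_iff_ne.mpr h
      simp [hf]
  · congr 2
    push_cast
    ring

theorem pv_cnt_eq_len (pre : List String) (c : String) :
    (pvIdxOf pre c).length = (pre.filter (fun m => pvPref m == c)).length := by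
  unfold pvIdxOf
  rw [List.length_map, ← List.countP_eq_length_filter, ← List.countP_eq_length_filter]
  have := PySem.List.map_snd_enumerate pre (0 : Int)
  calc ((PySem.List.enumerate pre).countP (fun p => pvPref p.2 == c))
      = (((PySem.List.enumerate pre).map (fun p => p.2)).countP (fun m => pvPref m == c)) := by
        rw [List.countP_map]; rfl
    _ = pre.countP (fun m => pvPref m == c) := by rw [this]

-- every element of pvIdxOf pre c is < |pre|; of the suffix part is > |pre|
theorem pv_idx_lt (pre : List String) (c : String) :
    ∀ i ∈ pvIdxOf pre c, i < (pre.length : Int) := by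
  intro i hi
  unfold pvIdxOf at hi
  rcases List.mem_map.mp hi with ⟨p, hp, rfl⟩
  have := pv_enumerate_fst_bound pre 0 p (List.mem_of_mem_filter hp)
  omega

theorem pv_mem_snd_enumerate {α : Type} (l : List α) (s : Int) (ji : Int × α)
    (h : ji ∈ PySem.List.enumerate l s) : ji.2 ∈ l := by
  have : ji.2 ∈ (PySem.List.enumerate l s).map (fun p => p.2) := List.mem_map_of_mem h
  rwa [PySem.List.map_snd_enumerate] at this

-- elements of the suffix part of an index list lie strictly above m
theorem pv_suffix_idx_gt (suff : List String) (m : Int) (c : String) :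
    ∀ i ∈ ((PySem.List.enumerate suff (m + 1)).filter
        (fun p => pvPref p.2 == c)).map (fun p => p.1), m < i := by
  intro i hi
  rcases List.mem_map.mp hi with ⟨p, hp, rfl⟩
  have := pv_enumerate_fst_bound suff (m + 1) p (List.mem_of_mem_filter hp)
  omega

-- inner key-assignment loop, category list containing m once at position |P|
theorem pv_F_get_match (c : String) (P S : List Int) (d : PySem.Dict Int String) (m : Int)
    (hS : ∀ i ∈ S, i ≠ m) :
    (((PySem.List.enumerate (P ++ m :: S)).foldl
        (fun (d : PySem.Dict Int String) ji => d.insert ji.2 (c ++ PySem.Int.toStr ji.1)) d).get? m)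
      = some (c ++ PySem.Int.toStr (P.length : Int)) := by
  rw [show PySem.List.enumerate (P ++ m :: S) = PySem.List.enumerate (P ++ m :: S) 0 from rfl,
      pv_enumerate_append, PySem.List.enumerate_cons]
  rw [pv_get?_fold_mem c _ _ d _ m
        (fun ji hji => hS ji.2 (pv_mem_snd_enumerate S _ ji hji))]
  norm_num

-- inner key-assignment loop, category list avoiding m
theorem pv_F_get_miss (c : String) (L : List Int) (d : PySem.Dict Int String) (m : Int)
    (h : ∀ i ∈ L, i ≠ m) :
    (((PySem.List.enumerate L).foldl
        (fun (d : PySem.Dict Int String) ji => d.insert ji.2 (c ++ PySem.Int.toStr ji.1)) d).get? m)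
      = d.get? m :=
  pv_get?_fold_not_mem c _ d m (fun ji hji => h ji.2 (pv_mem_snd_enumerate L _ ji hji))

-- every element of the full index list of a category other than pref(x) avoids |pre|
theorem pv_other_idx_ne (pre : List String) (x : String) (suff : List String) (c : String)
    (hne : ¬ pvPref x = c) :
    ∀ i ∈ pvIdxOf (pre ++ x :: suff) c, i ≠ (pre.length : Int) := by
  intro i hi
  rw [pv_idx_decomp] at hi
  have hf : (pvPref x == c) = false := beq_eq_false_iff_ne.mpr hne
  simp only [hf, Bool.false_eq_true, List.append_nil, List.mem_append, reduceIte] at hi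
  rcases hi with h | h
  · have := pv_idx_lt pre c i h
    omega
  · have := pv_suffix_idx_gt suff (pre.length : Int) c i h
    omega

-- key_at lookup: index |pre| gets key pref(x) + str(count of same category in pre)
theorem pv_keyAt_get (pre : List String) (x : String) (suff : List String) :
    (pvKeyAt (pre ++ x :: suff)).get? (pre.length : Int)
      = some (pvPref x ++ PySem.Int.toStr (pvCnt (pvPref x) pre)) := by
  have hmatch : ∀ (dd : PySem.Dict Int String),
      (((PySem.List.enumerate (pvIdxOf (pre ++ x :: suff) (pvPref x))).foldl
          (fun (d : PySem.Dict Int String) ji => d.insert ji.2 (pvPref x ++ PySem.Int.toStr ji.1)) dd).get? (pre.length : Int))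
        = some (pvPref x ++ PySem.Int.toStr (pvCnt (pvPref x) pre)) := by
    intro dd
    rw [pv_idx_decomp]
    simp only [beq_self_eq_true, if_pos, List.map_cons, List.map_nil]
    rw [List.append_assoc, List.singleton_append,
        pv_F_get_match _ _ _ dd _ (pv_suffix_idx_gt suff (pre.length : Int) (pvPref x) · · |> fun h => by omega)]
    rw [pvCnt, pv_cnt_eq_len]
  have hmiss : ∀ (c : String) (dd : PySem.Dict Int String), ¬ pvPref x = c →
      (((PySem.List.enumerate (pvIdxOf (pre ++ x :: suff) c)).foldl
          (fun (d : PySem.Dict Int String) ji => d.insert ji.2 (c ++ PySem.Int.toStr ji.1)) dd).get? (pre.length : Int))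
        = dd.get? (pre.length : Int) := by
    intro c dd hne
    exact pv_F_get_miss c _ dd _ (pv_other_idx_ne pre x suff c hne)
  unfold pvKeyAt
  simp only [List.foldl_cons, List.foldl_nil]
  by_cases hA : pvPref x = "A"
  · rw [hmiss "S" _ (by rw [hA]; decide), hmiss "H" _ (by rw [hA]; decide)]
    rw [← hA]; exact hmatch _
  · by_cases hH : pvPref x = "H"
    · rw [hmiss "S" _ (by rw [hH]; decide)]
      rw [show "H" = pvPref x from hH.symm]
      rw [hmatch _]
    · have hS : pvPref x = "S" := by
        unfold pvPref at *
        split_ifs at * <;> simp_all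
      rw [show "S" = pvPref x from hS.symm]
      rw [hmatch _]

-- the A-loop over a suffix equals the B-assembly loop over the same suffix
theorem pv_loop_eq : ∀ (suff pre : List String) (d : PySem.Dict String String),
    (suff.foldl
      (fun (st : PySem.Dict String String × Int × Int × Int) algo_name =>
        match st with
        | (res, sync_ctr, async_ctr, hybrid_ctr) =>
          if PySem.Str.isIn "async" algo_name then
            (res.insert ("A" ++ PySem.Int.toStr async_ctr) algo_name, sync_ctr, async_ctr + 1, hybrid_ctr)
          else if PySem.Str.isIn "hybrid" algo_name then
            (res.insert ("H" ++ PySem.Int.toStr hybrid_ctr) algo_name, sync_ctr, async_ctr, hybrid_ctr + 1)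
          else
            (res.insert ("S" ++ PySem.Int.toStr sync_ctr) algo_name, sync_ctr + 1, async_ctr, hybrid_ctr))
      (d, pvCnt "S" pre, pvCnt "A" pre, pvCnt "H" pre)).1
    = (PySem.List.enumerate suff (pre.length : Int)).foldl
        (fun (res : PySem.Dict String String) p =>
          res.insert (((pvKeyAt (pre ++ suff)).get? p.1).getD "") p.2)
        d := by
  intro suff
  induction suff with
  | nil => intro pre d; simp [PySem.List.enumerate]
  | cons x xs ih =>
    intro pre d
    rw [PySem.List.enumerate_cons, List.foldl_cons, List.foldl_cons]
    dsimp only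
    have hkey := pv_keyAt_get pre x xs
    have harr : pre ++ x :: xs = (pre ++ [x]) ++ xs := by simp
    by_cases hA : PySem.Str.isIn "async" x = true
    · have hp : pvPref x = "A" := by unfold pvPref; rw [if_pos hA]
      rw [hp] at hkey
      have hrec := ih (pre ++ [x]) (d.insert ("A" ++ PySem.Int.toStr (pvCnt "A" pre)) x)
      simp only [pvCnt_append_singleton, hp, List.length_append, List.length_singleton,
        show ("A" == "A") = true by decide, show ("A" == "H") = false by decide,
        show ("A" == "S") = false by decide, if_true, Bool.false_eq_true, if_false,
        add_zero] at hrec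
      rw [show ((pre.length + 1 : Nat) : Int) = (pre.length : Int) + 1 by push_cast; ring] at hrec
      rw [harr] at hkey ⊢
      rw [hkey, hA]
      simp only [if_true, Option.getD_some]
      exact hrec
    · by_cases hH : PySem.Str.isIn "hybrid" x = true
      · have hp : pvPref x = "H" := by unfold pvPref; rw [if_neg hA, if_pos hH]
        rw [hp] at hkey
        have hrec := ih (pre ++ [x]) (d.insert ("H" ++ PySem.Int.toStr (pvCnt "H" pre)) x)
        simp only [pvCnt_append_singleton, hp, List.length_append, List.length_singleton,
          show ("H" == "H") = true by decide, show ("H" == "A") = false by decide,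
          show ("H" == "S") = false by decide, if_true, Bool.false_eq_true, if_false,
          add_zero] at hrec
        rw [show ((pre.length + 1 : Nat) : Int) = (pre.length : Int) + 1 by push_cast; ring] at hrec
        rw [harr] at hkey ⊢
        rw [hkey, if_neg hA, if_pos hH]
        simp only [Option.getD_some]
        exact hrec
      · have hp : pvPref x = "S" := by unfold pvPref; rw [if_neg hA, if_neg hH]
        rw [hp] at hkey
        have hrec := ih (pre ++ [x]) (d.insert ("S" ++ PySem.Int.toStr (pvCnt "S" pre)) x)
        simp only [pvCnt_append_singleton, hp, List.length_append, List.length_singleton,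
          show ("S" == "S") = true by decide, show ("S" == "A") = false by decide,
          show ("S" == "H") = false by decide, if_true, Bool.false_eq_true, if_false,
          add_zero] at hrec
        rw [show ((pre.length + 1 : Nat) : Int) = (pre.length : Int) + 1 by push_cast; ring] at hrec
        rw [harr] at hkey ⊢
        rw [hkey, if_neg hA, if_neg hH]
        simp only [Option.getD_some]
        exact hrec

-- ===== VERDICT (by name: the statement is the Claim_ definition above) =====
theorem strategy_2_slug_spec : Claim_equal_strategy_2_slug := by
  intro algos _
  unfold Spec_strategy_2_slug strategy_2_slug strategy_2_slug_alt
  have := pv_loop_eq algos [] PySem.Dict.empty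
  simp only [pvCnt, List.filter_nil, List.length_nil, List.nil_append] at this
  rw [show ((0 : Nat) : Int) = 0 from rfl] at this
  exact congrArg PySem.Dict.items this
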